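-- pv_equiv track=rewrite | github.com/OrcaVenturers/tickr | nt8/client.py | parsing_orders_ids_old
-- ===== SOURCE A (Python) =====
-- def parsing_orders_ids_old(id_list, key="ORCA"):
--     result = {}
--     i = 0
--     n = len(id_list)
--
--     while i < n:
--         current_id = id_list[i]
--
--         # Check if the current ID starts with "Sim"
--         if current_id.startswith(key):
--             sim_id = current_id
--
--             # Ensure we have enough elements left for stop and profile
--             if (
--                 i + 2 < n
--                 and not id_list[i + 1].startswith(key)
--                 and not id_list[i + 2].startswith(key)
--             ):
--                 stop = id_list[i + 1]
--                 profile = id_list[i + 2]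
--                 result[sim_id] = {"sl_id": stop, "tp_id": profile}
--                 i += 3  # Skip over Sim ID, stop, and profile
--             else:
--                 i += 1  # Skip just the current Sim ID if no valid stop/profile pair exists
--         else:
--             i += 1  # Move to the next ID if it's not a key ID
--
--     return result
-- ===== SOURCE B (Python) =====
-- def parsing_orders_ids_old(id_list, key="ORCA"):
--     # Consume the IDs from a reversed stack: pop the next ID; when it is a key ID
--     # and the two IDs beneath it are plain, pop those two as its sl/tp pair.
--     result = {}
--     stack = id_list[::-1]
--     while stack:
--         head = stack.pop()
--         if (
--             head.startswith(key)
--             and len(stack) >= 2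
--             and not stack[-1].startswith(key)
--             and not stack[-2].startswith(key)
--         ):
--             sl = stack.pop()
--             tp = stack.pop()
--             result[head] = {"sl_id": sl, "tp_id": tp}
--     return result
-- ===== Notes on version B (the rewrite author's own statement) =====
-- stated objective: alternative
-- what changed: Replaced the index-cursor while loop (manual i with stride 3 or 1 over a fixed list) by a consuming-stack formulation: the list is reversed once and elements are popped one at a time, with a key ID popping its two following plain IDs as a pair; no index arithmetic remains.
import Mathlib
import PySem

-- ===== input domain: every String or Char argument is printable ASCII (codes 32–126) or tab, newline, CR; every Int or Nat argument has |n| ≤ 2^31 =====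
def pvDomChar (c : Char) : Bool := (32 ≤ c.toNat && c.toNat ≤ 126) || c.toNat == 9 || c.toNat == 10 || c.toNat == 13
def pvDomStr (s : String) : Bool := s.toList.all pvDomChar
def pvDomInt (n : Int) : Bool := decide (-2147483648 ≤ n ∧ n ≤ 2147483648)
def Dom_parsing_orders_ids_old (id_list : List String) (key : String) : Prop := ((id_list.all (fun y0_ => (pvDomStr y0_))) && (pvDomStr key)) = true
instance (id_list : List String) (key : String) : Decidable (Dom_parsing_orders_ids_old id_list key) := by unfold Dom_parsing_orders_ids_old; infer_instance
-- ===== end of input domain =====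

-- B replaces A's index-cursor while loop (stride 3 or 1) by a consuming-stack recursion:
-- pop the next ID; a key ID also pops its two plain followers as its sl/tp pair. Objective: alternative.


-- ===== PORT A =====
-- A's while loop: cursor i, stride 3 after consuming a (key, sl, tp) triple, else stride 1.
def pvAgoA (xs : List String) (key : String) (i : Nat)
    (res : PySem.Dict String (List (String × String))) :
    PySem.Dict String (List (String × String)) :=
  if i < xs.length then
    let cur := xs.getD i ""
    if PySem.Str.startswith cur key then
      if decide (i + 2 < xs.length) &&
         !(PySem.Str.startswith (xs.getD (i+1) "") key) &&
         !(PySem.Str.startswith (xs.getD (i+2) "") key) then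
        pvAgoA xs key (i+3)
          (res.insert cur [("sl_id", xs.getD (i+1) ""), ("tp_id", xs.getD (i+2) "")])
      else
        pvAgoA xs key (i+1) res
    else
      pvAgoA xs key (i+1) res
  else res
termination_by xs.length - i

def parsing_orders_ids_old (id_list : List String) (key : String) :
    List (String × List (String × String)) :=
  (pvAgoA id_list key 0 PySem.Dict.empty).items

-- ===== PORT B =====
-- B's consuming stack: Python's stack is id_list reversed with the top at the END;
-- here the stack is kept with its top at the HEAD (the two reversals cancel), so
-- 'stack.pop()' is pattern-matching off the head and 'stack[-1]'/'stack[-2]' are the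
-- next two heads.
def pvGoB (key : String) (stack : List String)
    (res : PySem.Dict String (List (String × String))) :
    PySem.Dict String (List (String × String)) :=
  match stack with
  | head :: sl :: tp :: rest' =>
    if PySem.Str.startswith head key &&
       !(PySem.Str.startswith sl key) && !(PySem.Str.startswith tp key) then
      pvGoB key rest' (res.insert head [("sl_id", sl), ("tp_id", tp)])
    else
      pvGoB key (sl :: tp :: rest') res
  | _ :: rest => pvGoB key rest res
  | [] => res

def parsing_orders_ids_old_alt (id_list : List String) (key : String) :
    List (String × List (String × String)) :=
  (pvGoB key id_list PySem.Dict.empty).items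

-- ===== PRECONDITION & SPEC =====
def Spec_parsing_orders_ids_old (id_list : List String) (key : String) (out : List (String × List (String × String))) : Prop := out = parsing_orders_ids_old_alt id_list key
instance (id_list : List String) (key : String) (out : List (String × List (String × String))) : Decidable (Spec_parsing_orders_ids_old id_list key out) := by unfold Spec_parsing_orders_ids_old; infer_instance

-- ===== CLAIM (what is proved, stated in full; the proofs are below) =====
def Claim_equal_parsing_orders_ids_old : Prop := ∀ (id_list : List String) (key : String), Dom_parsing_orders_ids_old id_list key → Spec_parsing_orders_ids_old id_list key (parsing_orders_ids_old id_list key)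

-- ===== LEMMAS AND PROOFS =====

-- A's loop from cursor i is B's stack recursion on the i-th suffix.
lemma pvAgoA_eq_goB (xs : List String) (key : String) :
    ∀ (k i : Nat) (res : PySem.Dict String (List (String × String))),
      xs.length - i ≤ k →
      pvAgoA xs key i res = pvGoB key (xs.drop i) res := by
  intro k
  induction k with
  | zero =>
    intro i res h
    have hi : ¬ i < xs.length := by omega
    rw [pvAgoA, List.drop_eq_nil_of_le (by omega : xs.length ≤ i)]
    simp [hi, pvGoB]
  | succ k ih =>
    intro i res h
    by_cases hi : i < xs.length
    · have hd : xs.drop i = xs[i] :: xs.drop (i+1) := List.drop_eq_getElem_cons hi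
      have hget : xs.getD i "" = xs[i] := List.getD_eq_getElem xs "" hi
      rw [pvAgoA]
      simp only [hi, if_true, hget]
      by_cases h2 : i + 2 < xs.length
      · have hd1 : xs.drop (i+1) = xs[i+1] :: xs.drop (i+2) :=
          List.drop_eq_getElem_cons (by omega)
        have hd2 : xs.drop (i+2) = xs[i+2] :: xs.drop (i+3) :=
          List.drop_eq_getElem_cons (by omega)
        have hget1 : xs.getD (i+1) "" = xs[i+1] := List.getD_eq_getElem xs "" (by omega)
        have hget2 : xs.getD (i+2) "" = xs[i+2] := List.getD_eq_getElem xs "" (by omega)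
        rw [hd, hd1, hd2, pvGoB, hget1, hget2]
        simp only [h2, decide_true, Bool.true_and]
        by_cases hs : PySem.Str.startswith xs[i] key
        · simp only [hs, if_true, Bool.true_and]
          by_cases hc : (!(PySem.Str.startswith xs[i+1] key) &&
              !(PySem.Str.startswith xs[i+2] key)) = true
          · rw [if_pos hc, if_pos hc, ih (i+3) _ (by omega)]
          · rw [if_neg hc, if_neg hc, ih (i+1) res (by omega), hd1, hd2]
        · have hs' : PySem.Str.startswith xs[i] key = false := Bool.eq_false_iff.mpr hs
          rw [ih (i+1) res (by omega), hd1, hd2]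
          have hs2 : PySem.Chars.startswith xs[i].toList key.toList = false := by
            simpa [PySem.Str.startswith] using hs'
          simp [hs2]
      · -- fewer than three elements remain: both sides step by one
        have hcF : (decide (i + 2 < xs.length) &&
            !(PySem.Str.startswith (xs.getD (i+1) "") key) &&
            !(PySem.Str.startswith (xs.getD (i+2) "") key)) = false := by
          simp [h2]
        rw [hcF]
        have hrest : pvGoB key (xs.drop i) res = pvGoB key (xs.drop (i+1)) res := by
          rw [hd]
          rcases hd1 : xs.drop (i+1) with _ | ⟨a, rest⟩
          · simp [pvGoB]
          · rcases hrest2 : rest with _ | ⟨b, rest'⟩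
            · simp [pvGoB]
            · exfalso
              have : (xs.drop (i+1)).length = xs.length - (i+1) := List.length_drop
              rw [hd1, hrest2] at this
              simp at this
              omega
        rw [hrest]
        by_cases hs : PySem.Str.startswith xs[i] key
        · simp only [hs, if_true]
          exact ih (i+1) res (by omega)
        · simp only [hs]
          exact ih (i+1) res (by omega)
    · rw [pvAgoA, List.drop_eq_nil_of_le (by omega : xs.length ≤ i)]
      simp [hi, pvGoB]

-- ===== VERDICT (by name: the statement is the Claim_ definition above) =====
theorem parsing_orders_ids_old_spec : Claim_equal_parsing_orders_ids_old := by
  intro id_list key _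
  unfold Spec_parsing_orders_ids_old parsing_orders_ids_old parsing_orders_ids_old_alt
  rw [pvAgoA_eq_goB id_list key id_list.length 0 PySem.Dict.empty (by omega)]
  rfl
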